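-- pv_equiv track=rewrite | github.com/jlianacastillo/Encriptado | VALID.py | ER
-- ===== SOURCE A (Python) =====
-- def ER(n):
--     strn=str(n)
--     lstrn=len(strn)
--     if (".") in strn or ("-") in strn:
--         lstrn=0
--         for i in strn:
--             if i!=("."):
--                 lstrn+=1
--             else:
--                 break
--         if ("-") in strn:
--             lstrn-=1
--     if lstrn>=4 and lstrn<=18:
--         if lstrn>=4 and lstrn<=6:
--             res=("mil"+str(lstrn-3))
--         if lstrn>=7 and lstrn<=9:
--             res=("millon"+str(lstrn-6))
--         if lstrn>=10 and lstrn<=12: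
--             res=("mil millon"+str(lstrn-9))
--         if lstrn>=13 and lstrn<=15:
--             res=("billon"+str(lstrn-12))
--         if lstrn>=16 and lstrn<=18:
--             res=("trillon"+str(lstrn-15))
--         return("("+res+")")
--     else:
--         return("")
-- ===== SOURCE B (Python) =====
-- def ER(n):
--     # Purely arithmetic: strip thousands-groups off |n| instead of measuring str(n).
--     m = abs(n)
--     groups = 0
--     while m >= 1000:
--         m //= 1000
--         groups += 1
--     if groups == 0 or groups > 5:
--         return ""
--     digits = 1 if m < 10 else (2 if m < 100 else 3)
--     return "(" + ("mil", "millon", "mil millon", "billon", "trillon")[groups - 1] + str(digits) + ")"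
-- ===== Notes on version B (the rewrite author's own statement) =====
-- stated objective: alternative
-- what changed: B never builds or inspects str(n): it works purely arithmetically, stripping thousands-groups off abs(n) with a division loop (m //= 1000) and reading the leading group's magnitude by two comparisons, whereas A measures the length of the decimal string character by character and runs a five-branch range cascade on that length.
import Mathlib
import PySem

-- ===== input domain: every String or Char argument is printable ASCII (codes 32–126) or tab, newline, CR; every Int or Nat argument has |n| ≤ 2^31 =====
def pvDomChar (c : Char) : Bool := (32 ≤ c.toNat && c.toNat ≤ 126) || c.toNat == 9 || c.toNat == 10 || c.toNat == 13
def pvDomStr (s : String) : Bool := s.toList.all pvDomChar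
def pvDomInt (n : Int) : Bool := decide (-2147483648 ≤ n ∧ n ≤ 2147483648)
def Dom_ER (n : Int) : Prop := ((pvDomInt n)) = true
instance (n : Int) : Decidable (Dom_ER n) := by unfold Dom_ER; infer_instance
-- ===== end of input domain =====

-- B is purely arithmetic (a //=1000 loop over abs(n), no string built) where A measures str(n) (objective: alternative).

-- ===== PORT A =====
-- 'for i in strn: if i != '.': lstrn += 1 else: break' — count the chars before the first '.'
def ER_countLoop : List Char → Int
  | [] => 0
  | c :: t => if c ≠ '.' then 1 + ER_countLoop t else 0

def ER (n : Int) : String :=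
  let strn := PySem.Int.toChars n          -- str(n), as its char list
  let lstrn : Int :=
    if ('.' ∈ strn) ∨ ('-' ∈ strn) then
      let l := ER_countLoop strn
      if '-' ∈ strn then l - 1 else l
    else (strn.length : Int)
  if lstrn ≥ 4 ∧ lstrn ≤ 18 then
    -- Python's 'res' is unassigned before the first matching branch; within 4..18 one always fires
    let res : List Char := []
    let res := if lstrn ≥ 4 ∧ lstrn ≤ 6 then ['m','i','l'] ++ PySem.Int.toChars (lstrn - 3) else res
    let res := if lstrn ≥ 7 ∧ lstrn ≤ 9 then ['m','i','l','l','o','n'] ++ PySem.Int.toChars (lstrn - 6) else res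
    let res := if lstrn ≥ 10 ∧ lstrn ≤ 12 then ['m','i','l',' ','m','i','l','l','o','n'] ++ PySem.Int.toChars (lstrn - 9) else res
    let res := if lstrn ≥ 13 ∧ lstrn ≤ 15 then ['b','i','l','l','o','n'] ++ PySem.Int.toChars (lstrn - 12) else res
    let res := if lstrn ≥ 16 ∧ lstrn ≤ 18 then ['t','r','i','l','l','o','n'] ++ PySem.Int.toChars (lstrn - 15) else res
    String.ofList ('(' :: res ++ [')'])
  else ""

-- ===== PORT B =====
-- 'while m >= 1000: m //= 1000; groups += 1'
def ER_altLoop (m g : Nat) : Nat × Nat :=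
  if _h : 1000 ≤ m then ER_altLoop (m / 1000) (g + 1) else (m, g)
termination_by m
decreasing_by exact Nat.div_lt_self (by omega) (by omega)

def ER_alt (n : Int) : String :=
  let p := ER_altLoop n.natAbs 0           -- m = abs(n); the while loop
  let m := p.1
  let groups := p.2
  if groups = 0 ∨ groups > 5 then ""
  else
    let digits : Int := if m < 10 then 1 else if m < 100 then 2 else 3
    let labels : List (List Char) :=
      [['m','i','l'], ['m','i','l','l','o','n'], ['m','i','l',' ','m','i','l','l','o','n'],
       ['b','i','l','l','o','n'], ['t','r','i','l','l','o','n']]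
    String.ofList ('(' :: labels.getD (groups - 1) [] ++ PySem.Int.toChars digits ++ [')'])

-- ===== PRECONDITION & SPEC =====
def Spec_ER (n : Int) (out : String) : Prop := out = ER_alt n
instance (n : Int) (out : String) : Decidable (Spec_ER n out) := by unfold Spec_ER; infer_instance

-- ===== CLAIM (what is proved, stated in full; the proofs are below) =====
def Claim_equal_ER : Prop := ∀ (n : Int), Dom_ER n → Spec_ER n (ER n)

-- ===== LEMMAS AND PROOFS =====

-- A's whole result is a function of the number of decimal digits of |n|; DigLen computes it arithmetically.
def DigLen (m : Nat) : Nat :=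
  if _h : m < 10 then 1 else DigLen (m / 10) + 1
termination_by m
decreasing_by exact Nat.div_lt_self (by omega) (by omega)

-- A's cascade, as a function of lstrn
def cascadeOf (L : Int) : String :=
  if L ≥ 4 ∧ L ≤ 18 then
    let res : List Char := []
    let res := if L ≥ 4 ∧ L ≤ 6 then ['m','i','l'] ++ PySem.Int.toChars (L - 3) else res
    let res := if L ≥ 7 ∧ L ≤ 9 then ['m','i','l','l','o','n'] ++ PySem.Int.toChars (L - 6) else res
    let res := if L ≥ 10 ∧ L ≤ 12 then ['m','i','l',' ','m','i','l','l','o','n'] ++ PySem.Int.toChars (L - 9) else res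
    let res := if L ≥ 13 ∧ L ≤ 15 then ['b','i','l','l','o','n'] ++ PySem.Int.toChars (L - 12) else res
    let res := if L ≥ 16 ∧ L ≤ 18 then ['t','r','i','l','l','o','n'] ++ PySem.Int.toChars (L - 15) else res
    String.ofList ('(' :: res ++ [')'])
  else ""

lemma digitChar_ok (k : Nat) : Nat.digitChar k ≠ '.' ∧ Nat.digitChar k ≠ '-' := by
  unfold Nat.digitChar
  rcases k with _|_|_|_|_|_|_|_|_|_|_|_|_|_|_|_|k <;> simp

lemma toDigitsCore_ok : ∀ (f m : Nat) (ds : List Char), (∀ c ∈ ds, c ≠ '.' ∧ c ≠ '-') →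
    ∀ c ∈ Nat.toDigitsCore 10 f m ds, c ≠ '.' ∧ c ≠ '-' := by
  intro f
  induction f with
  | zero => intro m ds h; simpa [Nat.toDigitsCore] using h
  | succ f ih =>
    intro m ds h c hc
    simp only [Nat.toDigitsCore] at hc
    split at hc
    · rcases List.mem_cons.mp hc with h1 | h1
      · exact h1 ▸ digitChar_ok _
      · exact h c h1
    · refine ih _ _ ?_ c hc
      intro c' hc'
      rcases List.mem_cons.mp hc' with h1 | h1
      · exact h1 ▸ digitChar_ok _
      · exact h c' h1

lemma no_dot (n : Int) : '.' ∉ PySem.Int.toChars n := by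
  unfold PySem.Int.toChars
  split
  · intro h
    rcases List.mem_cons.mp h with h1 | h1
    · exact absurd h1 (by decide)
    · exact (toDigitsCore_ok _ _ [] (by simp) _ h1).1 rfl
  · intro h
    exact (toDigitsCore_ok _ _ [] (by simp) _ h).1 rfl

lemma mem_dash (n : Int) : '-' ∈ PySem.Int.toChars n ↔ n < 0 := by
  unfold PySem.Int.toChars
  split
  · simp [*]
  · constructor
    · intro h
      exact absurd rfl (toDigitsCore_ok _ _ [] (by simp) _ h).2
    · intro h; omega

lemma countLoop_eq (s : List Char) (h : '.' ∉ s) : ER_countLoop s = (s.length : Int) := by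
  induction s with
  | nil => simp [ER_countLoop]
  | cons c t ih =>
    have hc : c ≠ '.' := fun e => h (e ▸ List.mem_cons_self)
    have ht : '.' ∉ t := fun e => h (List.mem_cons_of_mem _ e)
    simp [ER_countLoop, hc, ih ht]
    omega

-- exact length of Nat.toDigits, via fuel irrelevance (cites Nat.toDigitsCore_lens_eq)
lemma toDigitsCore_len : ∀ (f m : Nat), m < f →
    (Nat.toDigitsCore 10 f m []).length = DigLen m := by
  intro f
  induction f with
  | zero => omega
  | succ f ih =>
    intro m hm
    rw [DigLen]
    by_cases h10 : m < 10
    · have h0 : m / 10 = 0 := Nat.div_eq_of_lt h10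
      rw [dif_pos h10]
      simp [Nat.toDigitsCore, h0]
    · have hne : ¬ m / 10 = 0 := by omega
      have hlt : m / 10 < f := by omega
      rw [dif_neg h10]
      simp only [Nat.toDigitsCore, hne, if_false]
      rw [Nat.toDigitsCore_lens_eq, ih _ hlt]

lemma toDigits_len (m : Nat) : ((Nat.toDigits 10 m).length : Int) = (DigLen m : Int) := by
  have := toDigitsCore_len (m + 1) m (by omega)
  simp [Nat.toDigits, this]

-- Step 1: A is the cascade at the digit count of |n|
lemma ER_eq_cascade (n : Int) : ER n = cascadeOf (DigLen n.natAbs) := by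
  unfold ER cascadeOf
  have hdot := no_dot n
  have hcnt := countLoop_eq (PySem.Int.toChars n) hdot
  by_cases hneg : n < 0
  · have hdash : '-' ∈ PySem.Int.toChars n := (mem_dash n).mpr hneg
    have hlen : ((PySem.Int.toChars n).length : Int) = (DigLen n.natAbs : Int) + 1 := by
      unfold PySem.Int.toChars
      simp [hneg, toDigits_len]
    simp only [hdash, or_true, if_true, hcnt, hlen]
    norm_num
  · have hdash : '-' ∉ PySem.Int.toChars n := fun h => hneg ((mem_dash n).mp h)
    have hlen : ((PySem.Int.toChars n).length : Int) = (DigLen n.natAbs : Int) := by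
      unfold PySem.Int.toChars
      have : n.toNat = n.natAbs := by omega
      simp [hneg, this, toDigits_len]
    simp [hdot, hdash, hlen]

-- DigLen facts
lemma DigLen_small (q : Nat) (h : q < 1000) :
    DigLen q = if q < 10 then 1 else if q < 100 then 2 else 3 := by
  by_cases h1 : q < 10
  · rw [DigLen]; simp [h1]
  · by_cases h2 : q < 100
    · rw [DigLen, DigLen]
      have : q / 10 < 10 := by omega
      simp [h1, h2, this]
    · rw [DigLen, DigLen, DigLen]
      have ha : ¬ q / 10 < 10 := by omega
      have hb : q / 10 / 10 < 10 := by omega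
      simp [h1, h2, ha, hb]

lemma DigLen_step (m : Nat) (h : 1000 ≤ m) : DigLen m = DigLen (m / 1000) + 3 := by
  rw [DigLen, DigLen, DigLen]
  have h1 : ¬ m < 10 := by omega
  have h2 : ¬ m / 10 < 10 := by omega
  have h3 : ¬ m / 10 / 10 < 10 := by omega
  have h4 : m / 10 / 10 / 10 = m / 1000 := by omega
  simp [h1, h2, h3, h4]

-- one-step unfolding of the while loop
lemma ER_altLoop_eq (m g : Nat) :
    ER_altLoop m g = if 1000 ≤ m then ER_altLoop (m / 1000) (g + 1) else (m, g) := by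
  rw [ER_altLoop]
  split <;> simp_all

-- loop characterisation
lemma loop_shift (m : Nat) : ∀ g, ER_altLoop m g = ((ER_altLoop m 0).1, (ER_altLoop m 0).2 + g) := by
  induction m using Nat.strong_induction_on with
  | _ m ih =>
    intro g
    by_cases h : 1000 ≤ m
    · have hlt : m / 1000 < m := Nat.div_lt_self (by omega) (by omega)
      rw [ER_altLoop_eq m g, ER_altLoop_eq m 0, if_pos h, if_pos h]
      rw [ih _ hlt (g + 1), ih _ hlt (0 + 1)]
      simp; omega
    · rw [ER_altLoop_eq m g, ER_altLoop_eq m 0, if_neg h, if_neg h]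
      simp

lemma loop_spec (m : Nat) :
    (ER_altLoop m 0).1 < 1000 ∧ DigLen m = DigLen (ER_altLoop m 0).1 + 3 * (ER_altLoop m 0).2 := by
  induction m using Nat.strong_induction_on with
  | _ m ih =>
    by_cases h : 1000 ≤ m
    · have hlt : m / 1000 < m := Nat.div_lt_self (by omega) (by omega)
      obtain ⟨hq, hd⟩ := ih _ hlt
      rw [ER_altLoop_eq m 0, if_pos h, loop_shift (m / 1000) 1]
      refine ⟨hq, ?_⟩
      rw [DigLen_step m h, hd]
      ring
    · rw [ER_altLoop_eq m 0, if_neg h]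
      exact ⟨by omega, by simp⟩

-- B's post-loop branch equals A's cascade at the recombined digit count
lemma body_eq_cascade (q g : Nat) (hq : q < 1000) :
    (if g = 0 ∨ g > 5 then "" else
      String.ofList ('(' ::
        ([['m','i','l'], ['m','i','l','l','o','n'], ['m','i','l',' ','m','i','l','l','o','n'],
          ['b','i','l','l','o','n'], ['t','r','i','l','l','o','n']] : List (List Char)).getD (g - 1) [] ++
        PySem.Int.toChars (if q < 10 then 1 else if q < 100 then 2 else 3) ++ [')'])) =
    cascadeOf ((DigLen q + 3 * g : Nat) : Int) := by
  rw [DigLen_small q hq]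
  by_cases hg : g = 0 ∨ g > 5
  · rw [if_pos hg]
    unfold cascadeOf
    rw [if_neg (by split_ifs <;> push_cast <;> omega)]
  · rw [if_neg hg]
    have hg1 : 1 ≤ g := by omega
    have hg5 : g ≤ 5 := by omega
    by_cases h1 : q < 10
    · rw [if_pos h1, if_pos h1]
      interval_cases g <;> decide
    · by_cases h2 : q < 100
      · rw [if_neg h1, if_pos h2, if_neg h1, if_pos h2]
        interval_cases g <;> decide
      · rw [if_neg h1, if_neg h2, if_neg h1, if_neg h2]
        interval_cases g <;> decide

-- Step 2: B is the same cascade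
lemma ER_alt_eq_cascade (n : Int) : ER_alt n = cascadeOf (DigLen n.natAbs) := by
  obtain ⟨hq, hd⟩ := loop_spec n.natAbs
  unfold ER_alt
  rw [hd]
  generalize hE : ER_altLoop n.natAbs 0 = p at hq hd ⊢
  obtain ⟨q, g⟩ := p
  exact body_eq_cascade q g hq

-- ===== VERDICT (by name: the statement is the Claim_ definition above) =====
theorem ER_spec : Claim_equal_ER := by
  intro n _
  show ER n = ER_alt n
  rw [ER_eq_cascade, ER_alt_eq_cascade]
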